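-- pv_equiv track=rewrite | github.com/Justdoit2/Dynamic-Programming-in-Python | Prob1.py | has_subset
-- ===== SOURCE A (Python) =====
-- def has_subset(A,v):
--   if v in A:
--     return True
--   elif (len(A)==0 and v>0) or v < min([t for t in A]):
--     return False
--   else:
--
--     j=max([t for t in A if t<v])
--     A.remove(j)
--     return has_subset(A,v-j)
-- ===== SOURCE B (Python) =====
-- def _bisect_left(s, x):
--     lo, hi = 0, len(s)
--     while lo < hi:
--         mid = (lo + hi) // 2
--         if s[mid] < x:
--             lo = mid + 1
--         else:
--             hi = mid
--     return lo
--
-- def has_subset(A, v):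
--     s = sorted(A)
--     while True:
--         i = _bisect_left(s, v)
--         if i < len(s) and s[i] == v:
--             return True
--         if i == 0:
--             return False
--         v -= s.pop(i - 1)
-- ===== Notes on version B (the rewrite author's own statement) =====
-- stated objective: alternative
-- what changed: Replaces A's recursion, which rescans the whole list for membership, min, max-below-v and removal at every level, by sorting once and running an iterative loop that finds both the membership test and the largest element below v with a single binary search on the sorted list.
-- crash fix: On A = [] with v <= 0, A raises ValueError (min() of an empty list); B returns False. — e.g. on has_subset([], 0): A raises ValueError, B returns false
import Mathlib
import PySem

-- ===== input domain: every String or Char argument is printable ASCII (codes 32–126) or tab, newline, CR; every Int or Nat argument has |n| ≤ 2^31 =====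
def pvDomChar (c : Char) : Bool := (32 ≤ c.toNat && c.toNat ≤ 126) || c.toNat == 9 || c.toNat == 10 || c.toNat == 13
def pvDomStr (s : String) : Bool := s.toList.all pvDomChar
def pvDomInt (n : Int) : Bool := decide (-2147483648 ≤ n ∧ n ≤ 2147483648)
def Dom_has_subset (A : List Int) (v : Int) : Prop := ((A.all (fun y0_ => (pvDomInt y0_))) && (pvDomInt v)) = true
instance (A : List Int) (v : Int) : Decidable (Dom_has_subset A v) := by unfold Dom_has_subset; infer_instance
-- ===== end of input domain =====

-- B replaces A's recursion (with its per-level membership/min/max/remove scans) by sorting once and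
-- running an iterative loop with binary search on the sorted list (objective: alternative algorithm).
-- A mutates its argument list in place (A.remove); B does not — the equivalence proved is about the return value.

-- ===== PORT A =====
-- A's recursion removes one element per call, so it makes at most |A| nested calls; the fuel
-- `A.length + 1` is a totality guard only and is never exhausted on inputs satisfying Pre_.
def hsLoop : Nat → List Int → Int → Bool
  | 0, _, _ => false
  | f+1, A, v =>
    if v ∈ A then true
    else if A.length = 0 ∧ 0 < v then false
    else
      match PySem.List.min? A (fun t => t) with
      | none => false   -- Python raises ValueError here (min of [], i.e. A = [] and v ≤ 0): outside Pre_
      | some m =>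
        if v < m then false
        else
          match PySem.List.max? (List.filter (fun t => decide (t < v)) A) (fun t => t) with
          | none => false  -- unreachable: min A < v, so the filtered list is nonempty
          | some j =>
            match PySem.List.remove? A j with
            | none => false  -- unreachable: j ∈ A
            | some A' => hsLoop f A' (v - j)

def has_subset (A : List Int) (v : Int) : Bool := hsLoop (A.length + 1) A v

-- ===== PORT B =====
-- Source B's hand-written `_bisect_left` is exactly CPython's bisect_left lo/hi binary search,
-- which is PySem.List.bisectLeft.  The while-loop pops one element per iteration, so the
-- fuel `|A| + 1` is a totality guard only and is never exhausted.
def altLoop : Nat → List Int → Int → Bool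
  | 0, _, _ => false
  | f+1, s, v =>
    let i := PySem.List.bisectLeft s v
    -- `i < len(s) and s[i] == v` : for 0 ≤ i this is exactly pyGet? s i = some v
    if PySem.List.pyGet? s (i : Int) = some v then true
    else if i = 0 then false
    else
      match PySem.List.pop? s ((i - 1 : Nat) : Int) with
      | none => false  -- unreachable: 0 ≤ i-1 < len s
      | some (j, s') => altLoop f s' (v - j)

def has_subset_alt (A : List Int) (v : Int) : Bool :=
  altLoop (A.length + 1) (PySem.List.sorted A (fun t => t)) v

-- ===== PRECONDITION & SPEC =====
-- Pre_ excludes exactly the inputs where A raises ValueError: A = [] with v ≤ 0 (min of an empty list).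
def Pre_has_subset (A : List Int) (v : Int) : Prop := A ≠ [] ∨ 0 < v
instance (A : List Int) (v : Int) : Decidable (Pre_has_subset A v) := by unfold Pre_has_subset; infer_instance
def pvWitness_has_subset : List Int × Int := ([1, 2], 3)

-- On A = [] with v ≤ 0, A raises ValueError (min of an empty list); B returns False (no selection can be made).
def Raises_has_subset (A : List Int) (v : Int) : Prop := A = [] ∧ v ≤ 0
instance (A : List Int) (v : Int) : Decidable (Raises_has_subset A v) := by unfold Raises_has_subset; infer_instance
def pvRaiseWitness_has_subset : List Int × Int := ([], 0)
def pvRaiseWitnessOut_has_subset : Bool := false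

def Spec_has_subset (A : List Int) (v : Int) (out : Bool) : Prop := out = has_subset_alt A v
instance (A : List Int) (v : Int) (out : Bool) : Decidable (Spec_has_subset A v out) := by unfold Spec_has_subset; infer_instance

-- ===== CLAIM (what is proved, stated in full; the proofs are below) =====
def Claim_equal_has_subset : Prop := ∀ (A : List Int) (v : Int), Dom_has_subset A v → Pre_has_subset A v → Spec_has_subset A v (has_subset A v)
def Claim_raises_has_subset : Prop := (∀ (A : List Int) (v : Int), Dom_has_subset A v → Raises_has_subset A v → ¬ Pre_has_subset A v) ∧ (Dom_has_subset (pvRaiseWitness_has_subset.1) (pvRaiseWitness_has_subset.2) ∧ Raises_has_subset (pvRaiseWitness_has_subset.1) (pvRaiseWitness_has_subset.2) ∧ has_subset_alt (pvRaiseWitness_has_subset.1) (pvRaiseWitness_has_subset.2) = pvRaiseWitnessOut_has_subset)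

-- ===== LEMMAS AND PROOFS =====

theorem hsLoop_eq_altLoop : ∀ (f : Nat) (A : List Int) (v : Int),
    A.length < f → (A ≠ [] ∨ 0 < v) →
    hsLoop f A v = altLoop f (PySem.List.sorted A (fun t => t)) v := by
  intro f
  induction f with
  | zero => intro A v h _; exact absurd h (Nat.not_lt_zero _)
  | succ f ih =>
    intro A v hlen hpre
    set s := PySem.List.sorted A (fun t => t) with hs_def
    have hperm : s.Perm A := PySem.List.sorted_perm A (fun t => t) false
    have hsort : List.Pairwise (fun x1 x2 => x1 ≤ x2) s := PySem.List.sorted_pairwise A (fun t => t)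
    obtain ⟨hile, hlt, hge⟩ := PySem.List.bisectLeft_spec s v hsort
    have hslen : s.length = A.length := hperm.length_eq
    have hmono : ∀ (p q : Nat) (hp : p < s.length) (hq : q < s.length), p ≤ q → s[p] ≤ s[q] := by
      intro p q hp hq hpq
      rcases Nat.lt_or_eq_of_le hpq with h | h
      · exact List.pairwise_iff_getElem.mp hsort p q hp hq h
      · subst h; exact le_refl _
    have hmemget : v ∈ A ↔ PySem.List.pyGet? s ((PySem.List.bisectLeft s v : Nat) : Int) = some v := by
      constructor
      · intro hv
        obtain ⟨k, hk, hke⟩ := List.mem_iff_getElem.mp (hperm.mem_iff.mpr hv)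
        have hik : PySem.List.bisectLeft s v ≤ k := by
          by_contra h
          exact absurd hke (ne_of_lt (hlt k hk (by omega)))
        have hilen : PySem.List.bisectLeft s v < s.length := lt_of_le_of_lt hik hk
        have h1 : v ≤ s[PySem.List.bisectLeft s v] := hge _ hilen (le_refl _)
        have h2 : s[PySem.List.bisectLeft s v] ≤ s[k] := hmono _ k hilen hk hik
        have h3 : s[PySem.List.bisectLeft s v] = v := le_antisymm (hke ▸ h2) h1
        rw [PySem.List.pyGet?_natCast, List.getElem?_eq_getElem hilen, h3]
      · intro h
        exact hperm.mem_iff.mp (PySem.List.mem_of_pyGet?_eq_some s h)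
    by_cases hvA : v ∈ A
    · have hget := hmemget.mp hvA
      simp only [PySem.List.pyGet?_natCast] at hget
      simp [hsLoop, altLoop, hvA, hget]
    · by_cases hA : A = []
      · subst hA
        have hv0 : 0 < v := by rcases hpre with h | h; exacts [absurd rfl h, h]
        have hsnil : s = [] := hperm.eq_nil
        have hl0 : s.length = 0 := by rw [hsnil]; rfl
        have hi0 : PySem.List.bisectLeft s v = 0 := by omega
        simp [hsLoop, altLoop, hsnil, hv0, PySem.List.pyGet?]
      · have hAlen0 : A.length ≠ 0 := fun h => hA (List.length_eq_zero_iff.mp h)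
        obtain ⟨m, hm⟩ : ∃ m, PySem.List.min? A (fun t => t) = some m := by
          cases h : PySem.List.min? A (fun t => t) with
          | none => exact absurd ((PySem.List.min?_eq_none_iff A (fun t => t)).mp h) hA
          | some m => exact ⟨m, rfl⟩
        have hmmem : m ∈ A := PySem.List.min?_mem hm
        have hmmin : ∀ x ∈ A, m ≤ x := PySem.List.min?_isMin hm
        have hslen0 : 0 < s.length := by omega
        by_cases hvm : v < m
        · have hi0 : PySem.List.bisectLeft s v = 0 := by
            by_contra h
            have hlt0 := hlt 0 hslen0 (Nat.pos_of_ne_zero h)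
            have hmem0 : s[0] ∈ A := hperm.mem_iff.mp (List.getElem_mem hslen0)
            have := hmmin _ hmem0
            omega
          have hget : ¬ (s[(0 : Nat)]? = some v) := by
            rw [List.getElem?_eq_getElem hslen0]
            have hmem0 : s[0] ∈ A := hperm.mem_iff.mp (List.getElem_mem hslen0)
            have := hmmin _ hmem0
            intro hc
            have : s[0] = v := Option.some_injective _ hc
            omega
          have hget0 : ¬ PySem.List.pyGet? s (0 : Int) = some v := by
            rw [PySem.List.pyGet?_zero]; exact hget
          simp [hsLoop, altLoop, hvA, hAlen0, hm, hvm, hi0, hget0]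
        · have hmv : m < v := lt_of_le_of_ne (not_lt.mp hvm) (fun h => hvA (h ▸ hmmem))
          obtain ⟨k, hk, hke⟩ := List.mem_iff_getElem.mp (hperm.mem_iff.mpr hmmem)
          have hipos : 0 < PySem.List.bisectLeft s v := by
            by_contra h
            have := hge k hk (by omega)
            omega
          have hi1len : PySem.List.bisectLeft s v - 1 < s.length := by omega
          have hjlt : s[PySem.List.bisectLeft s v - 1] < v := hlt _ hi1len (by omega)
          have hjmemA : s[PySem.List.bisectLeft s v - 1] ∈ A := hperm.mem_iff.mp (List.getElem_mem hi1len)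
          have hfilter : s[PySem.List.bisectLeft s v - 1] ∈ A.filter (fun t => decide (t < v)) :=
            List.mem_filter.mpr ⟨hjmemA, by simpa using hjlt⟩
          obtain ⟨J, hJ⟩ : ∃ J, PySem.List.max? (List.filter (fun t => decide (t < v)) A) (fun t => t) = some J := by
            cases h : PySem.List.max? (List.filter (fun t => decide (t < v)) A) (fun t => t) with
            | none =>
                rw [PySem.List.max?_eq_none_iff] at h
                rw [h] at hfilter
                exact absurd hfilter List.not_mem_nil
            | some J => exact ⟨J, rfl⟩
          have hJmemf := PySem.List.max?_mem hJ
          have hJmem : J ∈ A := (List.mem_filter.mp hJmemf).1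
          have hJlt : J < v := by simpa using (List.mem_filter.mp hJmemf).2
          have hJj : J = s[PySem.List.bisectLeft s v - 1] := by
            apply le_antisymm
            · obtain ⟨k', hk', hk'e⟩ := List.mem_iff_getElem.mp (hperm.mem_iff.mpr hJmem)
              have hk'i : k' < PySem.List.bisectLeft s v := by
                by_contra h
                have := hge k' hk' (by omega)
                omega
              have := hmono k' (PySem.List.bisectLeft s v - 1) hk' hi1len (by omega)
              omega
            · exact PySem.List.max?_isMax hJ _ hfilter
          have hrem : PySem.List.remove? A J = some (A.erase J) :=
            PySem.List.remove?_eq_some_erase A J hJmem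
          have hpop : PySem.List.pop? s ((PySem.List.bisectLeft s v - 1 : Nat) : Int) =
              some (s[PySem.List.bisectLeft s v - 1], s.eraseIdx (PySem.List.bisectLeft s v - 1)) :=
            PySem.List.pop?_natCast s _ hi1len
          have hscons : s.Perm (s[PySem.List.bisectLeft s v - 1] :: s.eraseIdx (PySem.List.bisectLeft s v - 1)) := by
            conv_lhs => rw [← List.take_append_drop (PySem.List.bisectLeft s v - 1) s]
            rw [List.eraseIdx_eq_take_drop_succ, List.drop_eq_getElem_cons hi1len]
            exact List.perm_middle
          have hperm2 : (s.eraseIdx (PySem.List.bisectLeft s v - 1)).Perm (A.erase J) := by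
            have hAcons : A.Perm (J :: A.erase J) := List.perm_cons_erase hJmem
            have h1 : (s[PySem.List.bisectLeft s v - 1] :: s.eraseIdx (PySem.List.bisectLeft s v - 1)).Perm (J :: A.erase J) :=
              (hscons.symm.trans hperm).trans hAcons
            rw [← hJj] at h1
            exact h1.cons_inv
          have hsorted2 : List.Pairwise (fun x1 x2 => x1 ≤ x2) (s.eraseIdx (PySem.List.bisectLeft s v - 1)) :=
            hsort.sublist (List.eraseIdx_sublist s (PySem.List.bisectLeft s v - 1))
          have hkey : PySem.List.sorted (A.erase J) (fun t => t) = s.eraseIdx (PySem.List.bisectLeft s v - 1) :=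
            PySem.List.sorted_id_eq_of_perm_of_pairwise _ _ hperm2 hsorted2
          have hlen' : (A.erase J).length < f := by
            rw [List.length_erase_of_mem hJmem]
            have : 0 < A.length := List.length_pos_of_ne_nil hA
            omega
          have hpre' : A.erase J ≠ [] ∨ 0 < v - J := Or.inr (by omega)
          have hnotget : ¬ (PySem.List.pyGet? s ((PySem.List.bisectLeft s v : Nat) : Int) = some v) :=
            fun h => hvA (hmemget.mpr h)
          have hnotget' : ¬ (s[(PySem.List.bisectLeft s v : Nat)]? = some v) := by
            rw [← PySem.List.pyGet?_natCast]; exact hnotget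
          have hine : PySem.List.bisectLeft s v ≠ 0 := by omega
          have hrec := ih (A.erase J) (v - J) hlen' hpre'
          rw [hkey] at hrec
          have hleft : hsLoop (f+1) A v = hsLoop f (A.erase J) (v - J) := by
            simp [hsLoop, hvA, hAlen0, hm, hvm, hJ, hrem]
          have hright : altLoop (f+1) s v =
              altLoop f (s.eraseIdx (PySem.List.bisectLeft s v - 1)) (v - s[PySem.List.bisectLeft s v - 1]) := by
            simp [altLoop, hnotget', hine, hpop]
          rw [hleft, hright, ← hJj]
          exact hrec

-- ===== VERDICT (by name: the statement is the Claim_ definition above) =====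
theorem has_subset_spec : Claim_equal_has_subset := by
  intro A v _ hpre
  unfold Spec_has_subset has_subset has_subset_alt
  exact hsLoop_eq_altLoop (A.length + 1) A v (Nat.lt_succ_self _) hpre

@[simp] theorem has_subset_raises : Claim_raises_has_subset := by
  unfold Claim_raises_has_subset
  refine ⟨?_, by decide⟩
  intro A v _ h
  unfold Pre_has_subset
  rintro (h1 | h1)
  · exact h1 h.1
  · have := h.2; omega
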